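-- pv_equiv track=rewrite | github.com/acse-hst21/Leetcode_Answers | 290.py | mask_pattern
-- ===== SOURCE A (Python) =====
-- from typing import List
--
-- def mask_pattern(pattern: str) -> List[int]:
--     unique_letters = []
--     mask = []
--
--     for index, letter in enumerate(pattern):
--         if letter not in unique_letters:
--             unique_letters.append(letter)
--             mask.append(index)
--         else:
--             mask.append(pattern.index(letter))
--
--     return mask
-- ===== SOURCE B (Python) =====
-- def mask_pattern(pattern: str):
--     n = len(pattern)
--     # Sort the index set by character: a stable sort groups equal characters
--     # into contiguous runs whose indices stay in increasing order, so the run's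
--     # first element is that character's earliest index in the string.
--     order = sorted(range(n), key=lambda i: pattern[i])
--     res = [0] * n
--     prev = None
--     first = 0
--     for k in order:
--         c = pattern[k]
--         if prev != c:
--             prev = c
--             first = k
--         res[k] = first
--     return res
-- ===== Notes on version B (the rewrite author's own statement) =====
-- stated objective: alternative
-- what changed: Replaces A's interleaved loop (membership test on a growing unique-letters list plus a pattern.index rescan per duplicate) with a sort-based algorithm: stably sort the indices by character, then one grouped scan over that order assigns each run's first (hence minimal) index to every position of the run.
import Mathlib
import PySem

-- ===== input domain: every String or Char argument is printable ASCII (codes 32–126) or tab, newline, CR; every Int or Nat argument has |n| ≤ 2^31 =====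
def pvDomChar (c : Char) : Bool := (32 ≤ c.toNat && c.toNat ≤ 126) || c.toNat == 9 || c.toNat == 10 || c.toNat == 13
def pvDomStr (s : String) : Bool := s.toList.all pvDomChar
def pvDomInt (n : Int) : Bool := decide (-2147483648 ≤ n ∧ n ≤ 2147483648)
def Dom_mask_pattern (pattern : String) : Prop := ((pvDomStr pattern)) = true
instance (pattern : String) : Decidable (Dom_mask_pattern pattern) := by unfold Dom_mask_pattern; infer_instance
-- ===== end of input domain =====

-- B replaces A's interleaved loop (list-membership test + repeated pattern.index rescans) with a
-- sort-based algorithm: stably sort the indices by character, then one grouped scan assigns each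
-- run's first (minimal) index to every position of its run; objective: alternative.


-- ===== PORT A =====
-- A's loop: growing unique_letters list, membership-tested branch; duplicates get pattern.index(letter),
-- i.e. the first index of the one-char substring (the letter always occurs, so str.index = str.find: exact).
def mask_pattern (pattern : String) : List Int :=
  let cs := pattern.toList
  let res := (PySem.List.enumerate cs 0).foldl
    (fun (st : List Char × List Int) p =>
      if p.2 ∉ st.1 then (st.1 ++ [p.2], st.2 ++ [p.1])
      else (st.1, st.2 ++ [PySem.Chars.find cs [p.2]]))
    ([], [])
  res.2

-- ===== PORT B =====
-- B: sort the index list 0..n-1 stably by character (order = sorted(range(n), key=…)), then one pass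
-- over that order: at each new character remember its run-start index `first`, and write res[k] = first.
-- pattern[k] with k always in 0..n-1 → pyGetD; res[k] = first with 0 ≤ k < n → List.set k.toNat (exact there).
def mask_pattern_alt (pattern : String) : List Int :=
  let cs := pattern.toList
  let n := cs.length
  let order := PySem.List.sorted (PySem.List.pyRange 0 (n : Int) 1) (fun i => PySem.List.pyGetD cs i ' ')
  let out := order.foldl
    (fun (st : List Int × Option Char × Int) k =>
      let c := PySem.List.pyGetD cs k ' '
      if st.2.1 ≠ some c then ((st.1.set k.toNat k), some c, k)
      else ((st.1.set k.toNat st.2.2), st.2.1, st.2.2))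
    (List.replicate n 0, none, 0)
  out.1

-- ===== PRECONDITION & SPEC =====
def Spec_mask_pattern (pattern : String) (out : List Int) : Prop := out = mask_pattern_alt pattern
instance (pattern : String) (out : List Int) : Decidable (Spec_mask_pattern pattern out) := by unfold Spec_mask_pattern; infer_instance

-- ===== CLAIM (what is proved, stated in full; the proofs are below) =====
def Claim_equal_mask_pattern : Prop := ∀ (pattern : String), Dom_mask_pattern pattern → Spec_mask_pattern pattern (mask_pattern pattern)

-- ===== LEMMAS AND PROOFS =====

-- the character at index i of cs, as B's sort key reads it
def pvKey (cs : List Char) (i : Int) : Char := PySem.List.pyGetD cs i ' '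

-- the lexicographic (character, index) strict order that characterises B's stable sort
def pvLex (cs : List Char) (a b : Int) : Prop :=
  pvKey cs a < pvKey cs b ∨ (pvKey cs a = pvKey cs b ∧ a < b)

-- idxOf is characterised by "hit at k, miss before k"
theorem pv_idxOf_eq (cs : List Char) (c : Char) (k : Nat) (hk : k < cs.length)
    (hc : cs[k] = c) (hmin : ∀ j (hj : j < cs.length), j < k → cs[j] ≠ c) : cs.idxOf c = k := by
  induction cs generalizing k with
  | nil => simp at hk
  | cons x t ih =>
    cases k with
    | zero => simp_all
    | succ j =>
      have hx : x ≠ c := by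
        have := hmin 0 (by simp) (by omega); simpa using this
      rw [List.idxOf_cons_ne t hx]
      have : t.idxOf c = j := by
        apply ih j (by simpa using hk) (by simpa using hc)
        intro i hi hij
        have := hmin (i + 1) (by simpa using hi) (by omega)
        simpa using this
      omega

-- str.find of a one-char substring that occurs is the first index of that char
theorem pv_find_singleton (cs : List Char) (c : Char) (hc : c ∈ cs) :
    PySem.Chars.find cs [c] = ((cs.idxOf c : Nat) : Int) := by
  have hinf : [c] <:+: cs := (List.singleton_infix_iff c cs).mpr hc
  have hnn : 0 ≤ PySem.Chars.find cs [c] := (PySem.Chars.find_nonneg_iff cs [c]).mpr hinf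
  obtain ⟨hpre, hmin⟩ := PySem.Chars.find_spec hnn
  set k := (PySem.Chars.find cs [c]).toNat with hkdef
  obtain ⟨t, ht⟩ : ∃ t, cs.drop k = c :: t := by
    obtain ⟨t, ht⟩ := hpre; exact ⟨t, ht.symm⟩
  have hklt : k < cs.length := by
    by_contra h
    have : cs.drop k = [] := List.drop_eq_nil_of_le (by omega)
    simp [this] at ht
  have hgetk : cs[k] = c := by
    have h0 : (cs.drop k)[0]'(by simp [ht]) = c := by simp [ht]
    simpa using h0
  have hidx : cs.idxOf c = k := by
    apply pv_idxOf_eq cs c k hklt hgetk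
    intro j hj hjk hcj
    apply hmin j (by omega)
    have : cs.drop j = c :: cs.drop (j + 1) := by
      rw [List.drop_eq_getElem_cons hj, hcj]
    exact ⟨cs.drop (j + 1), by rw [this]; rfl⟩
  rw [hidx]
  omega

-- A's loop appends, for each char of the suffix, the first index of that char in the whole string
theorem pv_A_loop (cs : List Char) : ∀ (suf pre u : List Char) (m : List Int),
    cs = pre ++ suf → (∀ c, c ∈ u ↔ c ∈ pre) →
    ((PySem.List.enumerate suf (pre.length : Int)).foldl
      (fun (st : List Char × List Int) p =>
        if p.2 ∉ st.1 then (st.1 ++ [p.2], st.2 ++ [p.1])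
        else (st.1, st.2 ++ [PySem.Chars.find cs [p.2]]))
      (u, m)).2
      = m ++ suf.map (fun c => ((cs.idxOf c : Nat) : Int)) := by
  intro suf
  induction suf with
  | nil => intro pre u m hcs hu; simp [PySem.List.enumerate_nil]
  | cons letter rest ih =>
    intro pre u m hcs hu
    rw [PySem.List.enumerate_cons]
    by_cases hmem : letter ∈ u
    · have hpre : letter ∈ pre := (hu letter).mp hmem
      have hcm : letter ∈ cs := hcs ▸ List.mem_append_left _ hpre
      have step : ((pre.length : Int), letter) :: PySem.List.enumerate rest ((pre.length : Int) + 1)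
          = ((pre.length : Int), letter) :: PySem.List.enumerate rest (((pre ++ [letter]).length : Nat) : Int) := by
        simp
      rw [step, List.foldl_cons]
      simp only [hmem, not_true_eq_false, if_false]
      rw [ih (pre ++ [letter]) u (m ++ [PySem.Chars.find cs [letter]])
        (by rw [hcs, List.append_assoc]; rfl)
        (by intro c; rw [hu c]; simp; intro h; subst h; exact hpre)]
      simp [pv_find_singleton cs letter hcm]
    · have hpre : letter ∉ pre := fun h => hmem ((hu letter).mpr h)
      have hidx : cs.idxOf letter = pre.length := by
        rw [hcs, List.idxOf_append_of_notMem hpre]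
        simp
      have step : ((pre.length : Int), letter) :: PySem.List.enumerate rest ((pre.length : Int) + 1)
          = ((pre.length : Int), letter) :: PySem.List.enumerate rest (((pre ++ [letter]).length : Nat) : Int) := by
        simp
      rw [step, List.foldl_cons]
      simp only [hmem, not_false_eq_true, if_true]
      rw [ih (pre ++ [letter]) (u ++ [letter]) (m ++ [(pre.length : Int)])
        (by rw [hcs, List.append_assoc]; rfl)
        (by intro c; simp [hu c])]
      simp [hidx]

-- inserting x (larger in index than everything present) keeps the list strictly (char, index)-sorted
theorem pv_insertBy_lex (cs : List Char) (x : Int) (ys : List Int)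
    (h1 : ys.Pairwise (pvLex cs)) (h2 : ∀ y ∈ ys, y < x) :
    (PySem.List.insertBy (fun a b => decide (pvKey cs a < pvKey cs b)) x ys).Pairwise (pvLex cs) := by
  induction ys with
  | nil => simp [PySem.List.insertBy]
  | cons y t ih =>
    rw [PySem.List.insertBy]
    by_cases hlt : pvKey cs x < pvKey cs y
    · simp only [hlt, decide_true, if_true]
      refine List.pairwise_cons.mpr ⟨?_, h1⟩
      intro z hz
      rcases List.mem_cons.mp hz with rfl | hz
      · exact Or.inl hlt
      · have hyz := (List.pairwise_cons.mp h1).1 z hz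
        rcases hyz with h | ⟨h, _⟩
        · exact Or.inl (lt_trans hlt h)
        · exact Or.inl (h ▸ hlt)
    · simp only [hlt, decide_false]
      rw [if_neg (by simp)]
      refine List.pairwise_cons.mpr ⟨?_, ih (List.pairwise_cons.mp h1).2
        (fun z hz => h2 z (List.mem_cons_of_mem y hz))⟩
      intro w hw
      rcases (PySem.List.insertBy_mem_iff _ x w t).mp hw with hw | hw
      · subst hw
        rcases lt_or_eq_of_le (le_of_not_gt hlt) with h | h
        · exact Or.inl h
        · exact Or.inr ⟨h, h2 y (List.mem_cons_self)⟩
      · exact (List.pairwise_cons.mp h1).1 w hw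

-- sorting a strictly increasing index list by character yields a strictly (char, index)-sorted list:
-- stability of the sort, specialised to B's use
theorem pv_sorted_lex (cs : List Char) (xs : List Int) (hxs : xs.Pairwise (· < ·)) :
    (PySem.List.sorted xs (fun i => PySem.List.pyGetD cs i ' ')).Pairwise (pvLex cs) := by
  rw [PySem.List.sorted_eq_foldl_insertBy]
  suffices h : ∀ (l : List Int) (acc : List Int), l.Pairwise (· < ·) → acc.Pairwise (pvLex cs) →
      (∀ a ∈ acc, ∀ b ∈ l, a < b) →
      (l.foldl (fun acc x => PySem.List.insertBy
        (fun a b => decide ((fun i => PySem.List.pyGetD cs i ' ') a < (fun i => PySem.List.pyGetD cs i ' ') b)) x acc) acc).Pairwise (pvLex cs) by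
    exact h xs [] hxs (by simp) (by simp)
  intro l
  induction l with
  | nil => intro acc _ h2 _; simpa using h2
  | cons x t ih =>
    intro acc h1 h2 h3
    rw [List.foldl_cons]
    apply ih _ (List.pairwise_cons.mp h1).2
    · exact pv_insertBy_lex cs x acc h2 (fun y hy => h3 y hy x List.mem_cons_self)
    · intro a ha b hb
      rcases (PySem.List.insertBy_mem_iff _ x a acc).mp ha with ha | ha
      · subst ha; exact (List.pairwise_cons.mp h1).1 b hb
      · exact h3 a ha b (List.mem_cons_of_mem x hb)

-- B's grouped scan over the (char, index)-sorted order writes idxOf(char) at every visited index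
theorem pv_B_loop (cs : List Char) :
    ∀ (suf pre : List Int) (res : List Int) (prev : Option Char) (first : Int),
    (pre ++ suf).Pairwise (pvLex cs) →
    (∀ i, i ∈ pre ++ suf ↔ 0 ≤ i ∧ i < (cs.length : Int)) →
    (pre ++ suf).Nodup →
    res.length = cs.length →
    (∀ i ∈ pre, res[i.toNat]? = some ((cs.idxOf (pvKey cs i) : Nat) : Int)) →
    ((pre = [] ∧ prev = none) ∨
      (∃ p ∈ pre, prev = some (pvKey cs p) ∧ first = ((cs.idxOf (pvKey cs p) : Nat) : Int) ∧
        ∀ q ∈ pre, pvLex cs q p ∨ q = p)) →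
    (suf.foldl
      (fun (st : List Int × Option Char × Int) k =>
        let c := PySem.List.pyGetD cs k ' '
        if st.2.1 ≠ some c then ((st.1.set k.toNat k), some c, k)
        else ((st.1.set k.toNat st.2.2), st.2.1, st.2.2))
      (res, prev, first)).1.length = cs.length ∧
    ∀ i ∈ pre ++ suf,
      (suf.foldl
        (fun (st : List Int × Option Char × Int) k =>
          let c := PySem.List.pyGetD cs k ' '
          if st.2.1 ≠ some c then ((st.1.set k.toNat k), some c, k)
          else ((st.1.set k.toNat st.2.2), st.2.1, st.2.2))
        (res, prev, first)).1[i.toNat]? = some ((cs.idxOf (pvKey cs i) : Nat) : Int) := by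
  intro suf
  induction suf with
  | nil =>
    intro pre res prev first _ _ _ hlen hres _
    exact ⟨hlen, by simpa using hres⟩
  | cons k rest ih =>
    intro pre res prev first hpw hmemiff hnd hlen hres hinv
    have hkmem : k ∈ pre ++ k :: rest := by simp
    have hkrange := (hmemiff k).mp hkmem
    have hk0 : 0 ≤ k := hkrange.1
    have hkn : k < (cs.length : Int) := hkrange.2
    have hkN : k.toNat < cs.length := by omega
    have hkey : pvKey cs k = cs[k.toNat] := by
      simpa [pvKey] using PySem.List.pyGetD_eq_getElem cs ' ' hk0 hkn
    have hpw' := List.pairwise_append.mp hpw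
    have hpwk := List.pairwise_cons.mp hpw'.2.1
    have hprek : ∀ a ∈ pre, pvLex cs a k := fun a ha => hpw'.2.2 a ha k List.mem_cons_self
    -- shared facts for re-establishing the invariant on pre ++ [k]
    have hmem' : ∀ i, i ∈ (pre ++ [k]) ++ rest ↔ 0 ≤ i ∧ i < (cs.length : Int) := by
      intro i
      rw [List.append_assoc]
      exact hmemiff i
    have hpw2 : ((pre ++ [k]) ++ rest).Pairwise (pvLex cs) := by
      rw [List.append_assoc]; exact hpw
    have hnd2 : ((pre ++ [k]) ++ rest).Nodup := by
      rw [List.append_assoc]; exact hnd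
    have hkne : ∀ i ∈ pre, i.toNat ≠ k.toNat := by
      intro i hip
      have hir := (hmemiff i).mp (List.mem_append_left _ hip)
      have hik : i ≠ k := by
        intro h; subst h
        exact (List.disjoint_of_nodup_append hnd) hip List.mem_cons_self
      omega
    have hmax2 : ∀ q ∈ pre ++ [k], pvLex cs q k ∨ q = k := by
      intro q hq
      rcases List.mem_append.mp hq with hqp | hqk
      · exact Or.inl (hprek q hqp)
      · exact Or.inr (by simpa using hqk)
    -- idxOf(pvKey k) = k whenever no processed index shares k's char
    have hfresh : (∀ j ∈ pre, pvKey cs j ≠ pvKey cs k) → cs.idxOf (pvKey cs k) = k.toNat := by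
      intro hno
      apply pv_idxOf_eq cs _ k.toNat hkN hkey.symm
      intro j hj hjk
      have hjmem : ((j : Nat) : Int) ∈ pre ++ k :: rest := (hmemiff j).mpr ⟨by omega, by omega⟩
      have hjkey : pvKey cs ((j : Nat) : Int) = cs[j] := by
        simpa [pvKey] using PySem.List.pyGetD_eq_getElem cs ' ' (by omega : (0:Int) ≤ (j:Int))
          (by exact_mod_cast hj)
      intro hc
      rcases List.mem_append.mp hjmem with hjp | hjs
      · exact hno _ hjp (by rw [hjkey, hc, hkey])
      · rcases List.mem_cons.mp hjs with hjq | hjr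
        · omega
        · rcases hpwk.1 _ hjr with h | ⟨_, h⟩
          · rw [hjkey, hc, hkey] at h; exact absurd h (lt_irrefl _)
          · omega
    rw [List.foldl_cons]
    have hstep : (let c := PySem.List.pyGetD cs k ' ';
        if (res, prev, first).2.1 ≠ some c then ((res, prev, first).1.set k.toNat k, some c, k)
        else ((res, prev, first).1.set k.toNat (res, prev, first).2.2, (res, prev, first).2.1,
          (res, prev, first).2.2))
        = if prev ≠ some (PySem.List.pyGetD cs k ' ')
            then ((res.set k.toNat k), some (PySem.List.pyGetD cs k ' '), k)
            else ((res.set k.toNat first), prev, first) := rfl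
    rw [hstep]
    by_cases hbr : prev ≠ some (PySem.List.pyGetD cs k ' ')
    · -- new character: first := k, and k is its char's first occurrence
      rw [if_pos hbr]
      have hnewidx : cs.idxOf (pvKey cs k) = k.toNat := by
        apply hfresh
        intro j hjp hc
        rcases hinv with ⟨hpe, _⟩ | ⟨p, hp, hprev, _, hmax⟩
        · rw [hpe] at hjp; simp at hjp
        · have hl1 : pvLex cs j p ∨ j = p := hmax j hjp
          have hl2 : pvLex cs p k := hprek p hp
          have hjlep : pvKey cs j ≤ pvKey cs p := by
            rcases hl1 with hl1 | rfl
            · rcases hl1 with h | ⟨h, _⟩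
              · exact le_of_lt h
              · exact le_of_eq h
            · exact le_rfl
          have hplek : pvKey cs p ≤ pvKey cs k := by
            rcases hl2 with h | ⟨h, _⟩
            · exact le_of_lt h
            · exact le_of_eq h
          have hpk : pvKey cs p = pvKey cs k :=
            le_antisymm hplek (hc ▸ hjlep)
          apply hbr
          rw [hprev, hpk]
          rfl
      obtain ⟨L, M⟩ := ih (pre ++ [k]) (res.set k.toNat k)
        (some (PySem.List.pyGetD cs k ' ')) k hpw2 hmem' hnd2
        (by simpa using hlen)
        (by
          intro i hi
          rcases List.mem_append.mp hi with hip | hik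
          · rw [List.getElem?_set_ne (Ne.symm (hkne i hip))]
            exact hres i hip
          · have : i = k := by simpa using hik
            subst this
            rw [List.getElem?_set_self (by omega), hnewidx]
            congr 1
            omega)
        (Or.inr ⟨k, by simp, rfl, by rw [hnewidx]; omega, hmax2⟩)
      refine ⟨L, ?_⟩
      intro i hi
      exact M i (by rw [List.append_assoc]; exact hi)
    · -- same character as the previous run element: first already is idxOf(char)
      rw [if_neg hbr]
      have hpeq : prev = some (PySem.List.pyGetD cs k ' ') := not_not.mp hbr
      rcases hinv with ⟨hpe, hprev⟩ | ⟨p, hp, hprev, hfirst, hmax⟩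
      · rw [hprev] at hpeq; exact absurd hpeq (by simp)
      · have hprevk : pvKey cs p = pvKey cs k := by
          rw [hprev] at hpeq
          exact Option.some.inj hpeq
        have hfk : first = ((cs.idxOf (pvKey cs k) : Nat) : Int) := by
          rw [hfirst, hprevk]
        obtain ⟨L, M⟩ := ih (pre ++ [k]) (res.set k.toNat first) prev first hpw2 hmem' hnd2
          (by simpa using hlen)
          (by
            intro i hi
            rcases List.mem_append.mp hi with hip | hik
            · rw [List.getElem?_set_ne (Ne.symm (hkne i hip))]
              exact hres i hip
            · have : i = k := by simpa using hik
              subst this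
              rw [List.getElem?_set_self (by omega), hfk])
          (Or.inr ⟨k, by simp, hpeq, hfk, hmax2⟩)
        refine ⟨L, ?_⟩
        intro i hi
        exact M i (by rw [List.append_assoc]; exact hi)

-- ===== VERDICT (by name: the statement is the Claim_ definition above) =====
theorem mask_pattern_spec : Claim_equal_mask_pattern := by
  intro pattern _
  unfold Spec_mask_pattern mask_pattern
  set cs := pattern.toList with hcs
  set n := cs.length with hn
  -- A's value
  have hA := pv_A_loop cs cs [] [] [] (by simp) (by simp)
  simp only [List.length_nil, Nat.cast_zero, List.nil_append] at hA
  -- the sorted order and its properties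
  set order := PySem.List.sorted (PySem.List.pyRange 0 (n : Int) 1) (fun i => PySem.List.pyGetD cs i ' ') with horder
  have hrangepw : (PySem.List.pyRange 0 (n : Int) 1).Pairwise (· < ·) := by
    rw [PySem.List.pyRange_zero_natCast]
    exact List.Pairwise.map _ (fun a b h => by exact_mod_cast h) List.pairwise_lt_range
  have hperm : order.Perm (PySem.List.pyRange 0 (n : Int) 1) := PySem.List.sorted_perm _ _ _
  have hopw : order.Pairwise (pvLex cs) := pv_sorted_lex cs _ hrangepw
  have hond : order.Nodup := hperm.nodup_iff.mpr (hrangepw.imp (fun h => by omega)).nodup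
  have homem : ∀ i, i ∈ ([] : List Int) ++ order ↔ 0 ≤ i ∧ i < (cs.length : Int) := by
    intro i
    rw [List.nil_append, hperm.mem_iff, PySem.List.mem_pyRange_one]
  have hB := pv_B_loop cs order [] (List.replicate n 0) none 0
    (by simpa using hopw) homem (by simpa using hond) (by simpa using hn) (by simp) (Or.inl ⟨rfl, rfl⟩)
  have halt : mask_pattern_alt pattern = (order.foldl
      (fun (st : List Int × Option Char × Int) k =>
        let c := PySem.List.pyGetD cs k ' '
        if st.2.1 ≠ some c then ((st.1.set k.toNat k), some c, k)
        else ((st.1.set k.toNat st.2.2), st.2.1, st.2.2))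
      (List.replicate n 0, none, 0)).1 := rfl
  rw [hA, halt]
  apply List.ext_getElem?
  intro t
  by_cases ht : t < n
  · have htm : ((t : Int)) ∈ ([] : List Int) ++ order := (homem (t : Int)).mpr ⟨by omega, by exact_mod_cast ht⟩
    have := hB.2 (t : Int) htm
    simp only [Int.toNat_natCast] at this
    rw [this]
    have hkey : pvKey cs (t : Int) = cs[t] := by
      simpa [pvKey] using PySem.List.pyGetD_eq_getElem cs ' ' (by omega : (0:Int) ≤ (t:Int))
        (by exact_mod_cast ht)
    rw [hkey]
    rw [List.getElem?_map, List.getElem?_eq_getElem ht]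
    rfl
  · have h1 : (cs.map (fun c => ((cs.idxOf c : Nat) : Int)))[t]? = none := by
      rw [List.getElem?_eq_none]; simp; omega
    have h2 : _ = _ := hB.1
    rw [h1, List.getElem?_eq_none]
    omega
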